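-- pv_equiv track=rewrite | github.com/keen1014/algorithm | 백준/Gold/1941. 소문난 칠공주/소문난 칠공주.py | BFS
-- ===== SOURCE A (Python) =====
-- def BFS(list):
--     s=set(list)
--     if len(s)<=6:
--         return False
--     a=s.pop()
--     queue=[a]
--     while queue:
--         y,x=queue.pop()
--         for i in range(4):
--             ny=y+dy[i]
--             nx=x+dx[i]
--             if (ny, nx) in s:
--                 queue.append((ny,nx))
--                 s.remove((ny,nx))
--     if s:
--         return False
--     return True
--
-- dx=[0, -1, 0, 1]
--
-- dy=[-1, 0, 1, 0]
-- ===== SOURCE B (Python) =====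
-- def BFS(list):
--     cells = [*dict.fromkeys(list)]
--     if len(cells) <= 6:
--         return False
--     comps = []
--     for (y, x) in cells:
--         nbrs = [(y - 1, x), (y, x - 1), (y + 1, x), (y, x + 1)]
--         new = [(y, x)]
--         keep = []
--         for comp in comps:
--             if any(n in comp for n in nbrs):
--                 new += comp
--             else:
--                 keep.append(comp)
--         keep.append(new)
--         comps = keep
--     return len(comps) == 1
-- ===== Notes on version B (the rewrite author's own statement) =====
-- stated objective: alternative
-- what changed: Replaces the BFS/flood-fill frontier (stack of cells popped while erasing them from the set) by incremental connected-component merging: each cell starts its own component and all components adjacent to it are merged, connectivity = exactly one component at the end.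
import Mathlib
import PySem

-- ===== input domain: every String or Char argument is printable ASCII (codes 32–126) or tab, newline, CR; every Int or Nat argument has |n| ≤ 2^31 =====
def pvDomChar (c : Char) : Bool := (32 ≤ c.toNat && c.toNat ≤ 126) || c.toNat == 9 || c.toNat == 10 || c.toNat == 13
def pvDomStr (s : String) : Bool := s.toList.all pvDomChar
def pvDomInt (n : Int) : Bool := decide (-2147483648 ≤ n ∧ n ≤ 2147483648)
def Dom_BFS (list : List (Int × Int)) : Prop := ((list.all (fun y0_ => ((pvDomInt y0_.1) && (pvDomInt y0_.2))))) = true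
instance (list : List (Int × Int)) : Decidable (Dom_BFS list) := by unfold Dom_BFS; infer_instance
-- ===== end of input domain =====

-- B replaces A's flood fill (stack frontier, erasing visited cells from the set) by incremental
-- connected-component merging (one component list per region, merged cell by cell); alternative, same cost.
-- A's s.pop() takes an arbitrary element of a Python set; the port pops the first element of the
-- deduplicated list — the returned Bool is independent of that choice (that is what the proof shows).

-- ===== PORT A =====
def dxA : List Int := [0, -1, 0, 1]
def dyA : List Int := [-1, 0, 1, 0]

-- one iteration of the inner 'for i in range(4)' loop: d = (dy[i], dx[i]); state = (queue, s)
def stepA (y x : Int) (qs : List (Int × Int) × PySem.Set (Int × Int)) (d : Int × Int) :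
    List (Int × Int) × PySem.Set (Int × Int) :=
  let ny := y + d.1
  let nx := x + d.2
  if (ny, nx) ∈ qs.2 then (qs.1 ++ [(ny, nx)], qs.2.erase (ny, nx)) else qs
  -- s.remove((ny,nx)) after the membership test = List.erase (PySem.Set.remove?_eq_some_erase)

-- termination measure for the while loop (cited by loopA's decreasing_by)
theorem stepA_fold_measure (y x : Int) (l : List (Int × Int))
    (q0 : List (Int × Int)) (s0 : PySem.Set (Int × Int)) :
    (l.foldl (stepA y x) (q0, s0)).1.length + 2 * (l.foldl (stepA y x) (q0, s0)).2.length ≤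
      q0.length + 2 * s0.length := by
  induction l generalizing q0 s0 with
  | nil => simp
  | cons d l ih =>
    simp only [List.foldl_cons, stepA]
    split
    · refine le_trans (ih _ _) ?_
      rename_i hmem
      have := List.length_erase_of_mem hmem
      have : s0.length ≥ 1 := List.length_pos_of_mem hmem
      simp [List.length_erase_of_mem hmem]
      omega
    · exact ih _ _

-- the 'while queue:' loop; queue.pop() pops the LAST element
def loopA (queue : List (Int × Int)) (s : PySem.Set (Int × Int)) : List (Int × Int) :=
  if h : queue = [] then s
  else
    let c := queue.getLast h
    let rest := queue.dropLast
    -- 'for i in range(4)' over (dy[i], dx[i])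
    let r := (List.zip dyA dxA).foldl (stepA c.1 c.2) (rest, s)
    loopA r.1 r.2
termination_by queue.length + 2 * s.length
decreasing_by
  refine lt_of_le_of_lt (stepA_fold_measure _ _ _ _ _) ?_
  have : queue.dropLast.length = queue.length - 1 := by simp
  have : queue.length ≠ 0 := by simpa [List.length_eq_zero_iff] using h
  omega

def BFS (list : List (Int × Int)) : Bool :=
  let s := PySem.Set.ofList list
  if s.length ≤ 6 then false
  else
    match s with
    | [] => false   -- unreachable (length > 6); Python's s.pop() would raise KeyError only here
    | a :: s' =>    -- a = s.pop(): an arbitrary element; we take the first (result is order-independent)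
      let t := loopA [a] s'
      if t.isEmpty then true else false

-- ===== PORT B =====
def nbrsB (c : Int × Int) : List (Int × Int) :=
  [(c.1 - 1, c.2), (c.1, c.2 - 1), (c.1 + 1, c.2), (c.1, c.2 + 1)]

-- one iteration of B's outer loop: merge all components adjacent to cell c with [c]
def stepB (comps : List (List (Int × Int))) (c : Int × Int) : List (List (Int × Int)) :=
  let r := comps.foldl
    (fun (acc : List (Int × Int) × List (List (Int × Int))) comp =>
      if (nbrsB c).any (fun n => comp.contains n) then (acc.1 ++ comp, acc.2)
      else (acc.1, acc.2 ++ [comp]))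
    ([c], [])
  r.2 ++ [r.1]

def BFS_alt (list : List (Int × Int)) : Bool :=
  let cells := PySem.List.dedup list   -- [*dict.fromkeys(list)]
  if cells.length ≤ 6 then false
  else (cells.foldl stepB []).length == 1

-- ===== PRECONDITION & SPEC =====
def Spec_BFS (list : List (Int × Int)) (out : Bool) : Prop := out = BFS_alt list
instance (list : List (Int × Int)) (out : Bool) : Decidable (Spec_BFS list out) := by unfold Spec_BFS; infer_instance

-- ===== CLAIM (what is proved, stated in full; the proofs are below) =====
def Claim_equal_BFS : Prop := ∀ (list : List (Int × Int)), Dom_BFS list → Spec_BFS list (BFS list)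

-- ===== LEMMAS AND PROOFS =====

-- adjacency of grid cells and reachability inside a cell set
def Adj (c d : Int × Int) : Prop := d ∈ nbrsB c
def Stp (S : List (Int × Int)) (c d : Int × Int) : Prop := c ∈ S ∧ d ∈ S ∧ Adj c d
def Reach (S : List (Int × Int)) : (Int × Int) → (Int × Int) → Prop := Relation.ReflTransGen (Stp S)

theorem Adj_symm {c d : Int × Int} (h : Adj c d) : Adj d c := by
  obtain ⟨cy, cx⟩ := c; obtain ⟨dy, dx⟩ := d
  simp only [Adj, nbrsB, List.mem_cons, List.not_mem_nil, or_false, Prod.mk.injEq] at h ⊢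
  omega

theorem Reach_symm {S : List (Int × Int)} {c d : Int × Int} (h : Reach S c d) : Reach S d c :=
  (Relation.ReflTransGen.symmetric (fun _ _ hs => ⟨hs.2.1, hs.1, Adj_symm hs.2.2⟩)) h

theorem Reach_mono {S T : List (Int × Int)} (hST : ∀ x ∈ S, x ∈ T) {c d : Int × Int}
    (h : Reach S c d) : Reach T c d :=
  Relation.ReflTransGen.mono (fun _ _ hs => ⟨hST _ hs.1, hST _ hs.2.1, hs.2.2⟩) h

theorem zip_dydx : List.zip dyA dxA = [(-1, 0), (0, -1), (1, 0), (0, 1)] := by decide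

theorem adj_of_zip {y x : Int} {d : Int × Int} (hd : d ∈ List.zip dyA dxA) :
    Adj (y, x) (y + d.1, x + d.2) := by
  rw [zip_dydx] at hd
  simp only [List.mem_cons, List.not_mem_nil, or_false] at hd
  rcases hd with h | h | h | h <;> subst h <;>
    simp [Adj, nbrsB, Prod.ext_iff] <;> omega

theorem zip_of_adj {y x : Int} {m : Int × Int} (h : Adj (y, x) m) :
    ∃ d ∈ List.zip dyA dxA, m = (y + d.1, x + d.2) := by
  rw [zip_dydx]
  obtain ⟨my, mx⟩ := m
  simp only [Adj, nbrsB, List.mem_cons, List.not_mem_nil, or_false, Prod.mk.injEq] at h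
  simp only [List.mem_cons, List.not_mem_nil, or_false, Prod.mk.injEq]
  rcases h with ⟨h1, h2⟩ | ⟨h1, h2⟩ | ⟨h1, h2⟩ | ⟨h1, h2⟩
  · exact ⟨(-1, 0), Or.inl rfl, by omega⟩
  · exact ⟨(0, -1), Or.inr (Or.inl rfl), by omega⟩
  · exact ⟨(1, 0), Or.inr (Or.inr (Or.inl rfl)), by omega⟩
  · exact ⟨(0, 1), Or.inr (Or.inr (Or.inr rfl)), by omega⟩

-- ------- A side: invariant of the flood fill -------

-- effect of one full pass of the inner for-loop
theorem stepA_fold_spec (y x : Int) (l : List (Int × Int))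
    (hl : ∀ d ∈ l, d ∈ List.zip dyA dxA)
    (q0 : List (Int × Int)) (s0 : PySem.Set (Int × Int)) (hnd : s0.Nodup) :
    (∀ c ∈ (l.foldl (stepA y x) (q0, s0)).2, c ∈ s0) ∧
    (∀ c ∈ (l.foldl (stepA y x) (q0, s0)).1,
        c ∈ q0 ∨ (c ∈ s0 ∧ c ∉ (l.foldl (stepA y x) (q0, s0)).2 ∧ Adj (y, x) c)) ∧
    (∀ c ∈ q0, c ∈ (l.foldl (stepA y x) (q0, s0)).1) ∧
    (∀ c ∈ s0, c ∉ (l.foldl (stepA y x) (q0, s0)).2 →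
        c ∈ (l.foldl (stepA y x) (q0, s0)).1 ∧ Adj (y, x) c) ∧
    (∀ d ∈ l, (y + d.1, x + d.2) ∉ (l.foldl (stepA y x) (q0, s0)).2) ∧
    (l.foldl (stepA y x) (q0, s0)).2.Nodup := by
  induction l generalizing q0 s0 with
  | nil => exact ⟨fun c hc => hc, fun c hc => Or.inl hc, fun c hc => hc,
      fun c hc hc2 => absurd hc hc2, by simp, hnd⟩
  | cons d l ih =>
    have hdz : d ∈ List.zip dyA dxA := hl d List.mem_cons_self
    have hl' : ∀ e ∈ l, e ∈ List.zip dyA dxA := fun e he => hl e (List.mem_cons_of_mem _ he)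
    have hadj : Adj (y, x) (y + d.1, x + d.2) := adj_of_zip hdz
    simp only [List.foldl_cons, stepA]
    by_cases hmem : (y + d.1, x + d.2) ∈ s0
    · rw [if_pos hmem]
      have hnd' : (s0.erase (y + d.1, x + d.2)).Nodup := hnd.erase _
      obtain ⟨i1, i2, i3, i4, i5, i6⟩ := ih hl' (q0 ++ [(y + d.1, x + d.2)]) _ hnd'
      have hsub : ∀ c ∈ (l.foldl (stepA y x) (q0 ++ [(y + d.1, x + d.2)],
          s0.erase (y + d.1, x + d.2))).2, c ∈ s0 :=
        fun c hc => List.mem_of_mem_erase (i1 c hc)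
      have hnr : (y + d.1, x + d.2) ∉ (l.foldl (stepA y x) (q0 ++ [(y + d.1, x + d.2)],
          s0.erase (y + d.1, x + d.2))).2 :=
        fun hc => hnd.not_mem_erase (i1 _ hc)
      refine ⟨hsub, ?_, ?_, ?_, ?_, i6⟩
      · intro c hc
        rcases i2 c hc with hq | ⟨he, hnr2, ha⟩
        · rcases List.mem_append.mp hq with hq | hq
          · exact Or.inl hq
          · simp only [List.mem_cons, List.not_mem_nil, or_false] at hq
            exact Or.inr ⟨hq ▸ hmem, hq ▸ hnr, hq ▸ hadj⟩
        · exact Or.inr ⟨List.mem_of_mem_erase he, hnr2, ha⟩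
      · exact fun c hc => i3 c (List.mem_append_left _ hc)
      · intro c hc hcn
        by_cases hce : c ∈ s0.erase (y + d.1, x + d.2)
        · exact i4 c hce hcn
        · have hceq : c = (y + d.1, x + d.2) := by
            by_contra hne
            exact hce ((hnd.mem_erase_iff).mpr ⟨hne, hc⟩)
          exact ⟨i3 _ (List.mem_append_right _ (by simp [hceq])), hceq ▸ hadj⟩
      · intro e he
        rcases List.mem_cons.mp he with rfl | he'
        · exact hnr
        · exact i5 e he'
    · rw [if_neg hmem]
      obtain ⟨i1, i2, i3, i4, i5, i6⟩ := ih hl' q0 s0 hnd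
      refine ⟨i1, i2, i3, i4, ?_, i6⟩
      intro e he
      rcases List.mem_cons.mp he with rfl | he'
      · exact fun hc => hmem (i1 _ hc)
      · exact i5 e he'

-- the flood-fill invariant
def InvA (S0 : List (Int × Int)) (a : Int × Int) (q s : List (Int × Int)) : Prop :=
  s.Nodup ∧ (∀ c ∈ s, c ∈ S0) ∧ a ∉ s ∧
  (∀ c ∈ q, c ∈ S0 ∧ c ∉ s) ∧
  (∀ c ∈ S0, c ∉ s → Reach S0 a c) ∧
  (∀ v ∈ S0, v ∉ s → v ∉ q → ∀ m ∈ S0, Adj v m → m ∉ s)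

theorem loopA_inv (S0 : List (Int × Int)) (a : Int × Int)
    (q s : List (Int × Int)) (h : InvA S0 a q s) : InvA S0 a [] (loopA q s) := by
  fun_induction loopA q s with
  | case1 hq => simpa [loopA] using h
  | case2 q s hq c rest r ih =>
    apply ih
    obtain ⟨hnd, hs, ha, hqm, hreach, hclosed⟩ := h
    have hcq : c ∈ q := List.getLast_mem hq
    have hcS : c ∈ S0 := (hqm c hcq).1
    have hcs : c ∉ s := (hqm c hcq).2
    have hcr : Reach S0 a c := hreach c hcS hcs
    obtain ⟨i1, i2, i3, i4, i5, i6⟩ :=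
      stepA_fold_spec c.1 c.2 (List.zip dyA dxA) (fun d hd => hd) rest s hnd
    have hqsplit : q = rest ++ [c] := (List.dropLast_append_getLast hq).symm
    refine ⟨i6, fun e he => hs e (i1 e he), fun he => ha (i1 a he), ?_, ?_, ?_⟩
    · intro e he
      rcases i2 e he with hqe | ⟨hes, hnr, _⟩
      · have : e ∈ q := hqsplit ▸ List.mem_append_left _ hqe
        exact ⟨(hqm e this).1, fun he2 => (hqm e this).2 (i1 e he2)⟩
      · exact ⟨hs e hes, hnr⟩
    · intro e heS her
      by_cases hes : e ∈ s
      · obtain ⟨_, hadj⟩ := i4 e hes her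
        exact hcr.tail ⟨hcS, heS, by simpa using hadj⟩
      · exact hreach e heS hes
    · intro v hvS hvr hvq m hmS hadj hmr
      by_cases hvc : v = c
      · obtain ⟨d, hd, hmd⟩ := zip_of_adj (show Adj (c.1, c.2) m by simpa using hvc ▸ hadj)
        exact i5 d hd (hmd ▸ hmr)
      · have hvrest : v ∉ rest := fun hvrest => hvq (i3 v hvrest)
        have hvq0 : v ∉ q := by
          rw [hqsplit]
          simp [hvrest, hvc]
        by_cases hvs : v ∈ s
        · exact absurd (i4 v hvs hvr).1 hvq
        · exact hclosed v hvS hvs hvq0 m hmS hadj (i1 m hmr)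

theorem BFS_char (list : List (Int × Int)) (a : Int × Int) (s' : List (Int × Int))
    (hS : PySem.Set.ofList list = a :: s') (hlen : ¬ (PySem.Set.ofList list).length ≤ 6) :
    (BFS list = true ↔ ∀ c ∈ PySem.Set.ofList list, Reach (PySem.Set.ofList list) a c) := by
  have hnd : (a :: s').Nodup := hS ▸ PySem.Set.nodup_ofList list
  have hnd' := List.nodup_cons.mp hnd
  have hlen' : ¬ (a :: s').length ≤ 6 := by rw [← hS]; exact hlen
  have hB : BFS list = if (loopA [a] s').isEmpty then true else false := by
    unfold BFS
    rw [hS]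
    simp only [if_neg hlen']
  have hInit : InvA (a :: s') a [a] s' := by
    refine ⟨hnd'.2, fun e he => List.mem_cons_of_mem _ he, hnd'.1, ?_, ?_, ?_⟩
    · intro e he
      simp only [List.mem_cons, List.not_mem_nil, or_false] at he
      exact ⟨he ▸ List.mem_cons_self, he ▸ hnd'.1⟩
    · intro e heS hes
      rcases List.mem_cons.mp heS with rfl | he'
      · exact Relation.ReflTransGen.refl
      · exact absurd he' hes
    · intro v hvS hvs hvq
      rcases List.mem_cons.mp hvS with rfl | hv'
      · exact absurd List.mem_cons_self hvq
      · exact absurd hv' hvs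
  obtain ⟨_, fs, fa, _, freach, fclosed⟩ := loopA_inv (a :: s') a [a] s' hInit
  rw [hB, hS]
  constructor
  · intro htrue c hcS
    have htE : (loopA [a] s').isEmpty := by
      by_contra hne
      rw [if_neg (by simpa using hne)] at htrue
      exact Bool.false_ne_true htrue
    have ht : loopA [a] s' = [] := by simpa [List.isEmpty_iff] using htE
    exact freach c hcS (by rw [ht]; exact List.not_mem_nil)
  · intro hgood
    have hnot : ∀ e, Reach (a :: s') a e → e ∉ loopA [a] s' := by
      intro e hr
      induction hr with
      | refl => exact fa
      | tail h1 h2 ih =>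
        exact fclosed _ h2.1 ih (List.not_mem_nil) _ h2.2.1 h2.2.2
    have ht : loopA [a] s' = [] := by
      rw [List.eq_nil_iff_forall_not_mem]
      intro e he
      exact hnot e (hgood e (fs e he)) he
    simp [ht]

-- ------- B side: invariant of component merging -------

def InvB (P : List (Int × Int)) (comps : List (List (Int × Int))) : Prop :=
  comps.flatten.Perm P ∧
  (∀ comp ∈ comps, comp ≠ []) ∧
  (∀ comp ∈ comps, ∀ u ∈ comp, ∀ v ∈ comp, Reach P u v) ∧
  (∀ comp ∈ comps, ∀ u ∈ comp, ∀ v ∈ P, Adj u v → v ∈ comp)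

def hitB (c : Int × Int) (comp : List (Int × Int)) : Bool :=
  (nbrsB c).any (fun n => comp.contains n)

theorem stepB_eq (comps : List (List (Int × Int))) (c : Int × Int) :
    stepB comps c =
      comps.filter (fun comp => ! hitB c comp) ++ [c :: (comps.filter (hitB c)).flatten] := by
  suffices h : ∀ (l : List (List (Int × Int))) (acc : List (Int × Int) × List (List (Int × Int))),
      l.foldl (fun acc comp =>
          if (nbrsB c).any (fun n => comp.contains n) then (acc.1 ++ comp, acc.2)
          else (acc.1, acc.2 ++ [comp])) acc =
        (acc.1 ++ (l.filter (hitB c)).flatten, acc.2 ++ l.filter (fun comp => ! hitB c comp)) by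
    simp [stepB, h comps ([c], [])]
  intro l
  induction l with
  | nil => simp
  | cons comp l ih =>
    intro acc
    simp only [List.foldl_cons]
    by_cases hh : ((nbrsB c).any fun n => comp.contains n) = true
    · have hfil : List.filter (hitB c) (comp :: l) = comp :: List.filter (hitB c) l := by
        simp [List.filter_cons, hitB]
        simpa using hh
      have hfil2 : List.filter (fun comp => ! hitB c comp) (comp :: l) =
          List.filter (fun comp => ! hitB c comp) l := by
        simp [List.filter_cons, hitB]
        simpa using hh
      rw [if_pos hh, ih, hfil, hfil2]
      simp
    · have hh' : ((nbrsB c).any fun n => comp.contains n) = false := eq_false_of_ne_true hh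
      have hfil : List.filter (hitB c) (comp :: l) = List.filter (hitB c) l := by
        simp [List.filter_cons, hitB]
        simpa using hh'
      have hfil2 : List.filter (fun comp => ! hitB c comp) (comp :: l) =
          comp :: List.filter (fun comp => ! hitB c comp) l := by
        simp [List.filter_cons, hitB]
        simpa using hh'
      rw [if_neg hh, ih, hfil, hfil2]
      simp

theorem stepB_inv (P : List (Int × Int)) (comps : List (List (Int × Int))) (c : Int × Int)
    (h : InvB P comps) (hc : c ∉ P) : InvB (P ++ [c]) (stepB comps c) := by
  obtain ⟨hperm, hne, hreach, hclosed⟩ := h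
  rw [stepB_eq]
  have hPsub : ∀ x ∈ P, x ∈ P ++ [c] := fun x hx => List.mem_append_left _ hx
  have hcP : c ∈ P ++ [c] := List.mem_append_right _ (List.mem_cons_self)
  have hmemP : ∀ {x : Int × Int}, x ∈ comps.flatten ↔ x ∈ P := fun {x} => hperm.mem_iff
  have hhit_of : ∀ {comp : List (Int × Int)}, hitB c comp = true →
      ∃ u ∈ comp, Adj c u := by
    intro comp hcomp
    obtain ⟨n, hn, hcn⟩ := List.any_eq_true.mp hcomp
    exact ⟨n, by simpa using hcn, hn⟩
  have hhit_intro : ∀ {comp : List (Int × Int)} {u : Int × Int}, u ∈ comp → Adj c u →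
      hitB c comp = true := by
    intro comp u hu hadj
    exact List.any_eq_true.mpr ⟨u, hadj, by simpa using hu⟩
  -- every element of the new merged component is reachable from c
  have reach_c : ∀ u ∈ c :: (comps.filter (hitB c)).flatten, Reach (P ++ [c]) c u := by
    intro u hu
    rcases List.mem_cons.mp hu with rfl | hu
    · exact Relation.ReflTransGen.refl
    · obtain ⟨comp0, hcomp0, hu0⟩ := List.mem_flatten.mp hu
      have hcomp0' := List.mem_filter.mp hcomp0
      obtain ⟨w, hw, hadj⟩ := hhit_of hcomp0'.2
      have hwP : w ∈ P := hmemP.mp (List.mem_flatten.mpr ⟨comp0, hcomp0'.1, hw⟩)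
      have h1 : Reach (P ++ [c]) c w := Relation.ReflTransGen.single ⟨hcP, hPsub _ hwP, hadj⟩
      have h2 : Reach P w u := hreach comp0 hcomp0'.1 w hw u hu0
      exact h1.trans (Reach_mono hPsub h2)
  refine ⟨?_, ?_, ?_, ?_⟩
  · -- flatten is a permutation of P ++ [c]
    have e1 : (comps.filter (fun comp => ! hitB c comp) ++ [c :: (comps.filter (hitB c)).flatten]).flatten
        = (comps.filter (fun comp => ! hitB c comp)).flatten ++ c :: (comps.filter (hitB c)).flatten := by
      simp
    rw [e1]
    refine List.Perm.trans List.perm_middle ?_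
    refine List.Perm.trans ?_ (List.perm_append_singleton c P).symm
    refine List.Perm.cons c ?_
    rw [← List.flatten_append]
    refine List.Perm.trans (List.Perm.flatten ?_) hperm
    exact List.Perm.trans (List.perm_append_comm) (List.filter_append_perm _ comps)
  · intro comp hcomp
    rcases List.mem_append.mp hcomp with hk | hn'
    · exact hne comp (List.mem_filter.mp hk).1
    · simp only [List.mem_cons, List.not_mem_nil, or_false] at hn'
      subst hn'; simp
  · intro comp hcomp u hu v hv
    rcases List.mem_append.mp hcomp with hk | hn'
    · exact Reach_mono hPsub (hreach comp (List.mem_filter.mp hk).1 u hu v hv)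
    · simp only [List.mem_cons, List.not_mem_nil, or_false] at hn'
      subst hn'
      exact (Reach_symm (reach_c u hu)).trans (reach_c v hv)
  · intro comp hcomp u hu v hv hadj
    rcases List.mem_append.mp hcomp with hk | hn'
    · have hk' := List.mem_filter.mp hk
      rcases List.mem_append.mp hv with hvP | hvc
      · exact hclosed comp hk'.1 u hu v hvP hadj
      · simp only [List.mem_cons, List.not_mem_nil, or_false] at hvc
        have : hitB c comp = true := hhit_intro hu (Adj_symm (hvc ▸ hadj))
        simp [this] at hk'
    · simp only [List.mem_cons, List.not_mem_nil, or_false] at hn'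
      subst hn'
      rcases List.mem_append.mp hv with hvP | hvc
      · rcases List.mem_cons.mp hu with huc | hu'
        · -- u = c : v is adjacent to c, so v's old component was merged
          obtain ⟨comp0, hcomp0, hv0⟩ := List.mem_flatten.mp (hmemP.mpr hvP)
          have : comp0 ∈ comps.filter (hitB c) :=
            List.mem_filter.mpr ⟨hcomp0, hhit_intro hv0 (huc ▸ hadj)⟩
          exact List.mem_cons_of_mem _ (List.mem_flatten.mpr ⟨comp0, this, hv0⟩)
        · obtain ⟨comp0, hcomp0, hu0⟩ := List.mem_flatten.mp hu'
          have hcomp0' := List.mem_filter.mp hcomp0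
          have : v ∈ comp0 := hclosed comp0 hcomp0'.1 u hu0 v hvP hadj
          exact List.mem_cons_of_mem _ (List.mem_flatten.mpr ⟨comp0, hcomp0, this⟩)
      · simp only [List.mem_cons, List.not_mem_nil, or_false] at hvc
        rw [hvc]
        exact List.mem_cons_self

theorem foldB_inv (rest P : List (Int × Int)) (comps : List (List (Int × Int)))
    (h : InvB P comps) (hnd : (P ++ rest).Nodup) : InvB (P ++ rest) (rest.foldl stepB comps) := by
  induction rest generalizing P comps with
  | nil => simpa using h
  | cons c rest ih =>
    have hc : c ∉ P := fun hmem =>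
      (List.nodup_append.mp hnd).2.2 c hmem c (List.mem_cons_self) rfl
    have h' := stepB_inv P comps c h hc
    have hnd' : ((P ++ [c]) ++ rest).Nodup := by
      simpa [List.append_assoc] using hnd
    simpa [List.append_assoc] using ih (P ++ [c]) (stepB comps c) h' hnd'

theorem comp_closed (S : List (Int × Int)) (comps : List (List (Int × Int)))
    (h : InvB S comps) {comp : List (Int × Int)} (hcomp : comp ∈ comps)
    {u v : Int × Int} (hu : u ∈ comp) (hr : Reach S u v) : v ∈ comp := by
  induction hr with
  | refl => exact hu
  | tail _ hs ih => exact h.2.2.2 comp hcomp _ ih _ hs.2.1 hs.2.2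

theorem BFS_alt_char (list : List (Int × Int)) (a : Int × Int) (s' : List (Int × Int))
    (hS : PySem.Set.ofList list = a :: s') (hlen : ¬ (PySem.Set.ofList list).length ≤ 6) :
    (BFS_alt list = true ↔ ∀ c ∈ PySem.Set.ofList list, Reach (PySem.Set.ofList list) a c) := by
  have hded : PySem.List.dedup list = PySem.Set.ofList list := PySem.List.dedup_eq_ofList list
  have hBalt : BFS_alt list = (((PySem.Set.ofList list).foldl stepB []).length == 1) := by
    rw [BFS_alt, hded]
    simp only [if_neg hlen]
  have hnd : (PySem.Set.ofList list).Nodup := PySem.Set.nodup_ofList list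
  have hInv : InvB (PySem.Set.ofList list) ((PySem.Set.ofList list).foldl stepB []) := by
    have h0 : InvB [] [] := ⟨by simp, by simp, by simp, by simp⟩
    simpa using foldB_inv (PySem.Set.ofList list) [] [] h0 (by simp [hnd])
  obtain ⟨hperm, hne, hreach, hclosed⟩ := hInv
  have haS : a ∈ PySem.Set.ofList list := by rw [hS]; exact List.mem_cons_self
  rw [hBalt]
  simp only [beq_iff_eq]
  constructor
  · intro hlen1 c hcS
    obtain ⟨l, hl⟩ := List.length_eq_one_iff.mp hlen1
    rw [hl] at hperm hreach
    have hflat : ([l] : List (List (Int × Int))).flatten = l := by simp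
    rw [hflat] at hperm
    exact hreach l (List.mem_cons_self) a (hperm.mem_iff.mpr haS) c (hperm.mem_iff.mpr hcS)
  · intro hgood
    match hcomps : (PySem.Set.ofList list).foldl stepB [] with
    | [] =>
      rw [hcomps] at hperm
      have : PySem.Set.ofList list = [] := hperm.symm.eq_nil
      rw [this] at hS; exact absurd hS (by simp)
    | [l] => rfl
    | l1 :: l2 :: t =>
      exfalso
      rw [hcomps] at hperm hne hreach hclosed
      obtain ⟨x1, hx1⟩ := List.exists_mem_of_ne_nil l1 (hne l1 List.mem_cons_self)
      obtain ⟨x2, hx2⟩ := List.exists_mem_of_ne_nil l2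
        (hne l2 (List.mem_cons_of_mem _ List.mem_cons_self))
      have hx1S : x1 ∈ PySem.Set.ofList list :=
        hperm.mem_iff.mp (List.mem_flatten.mpr ⟨l1, List.mem_cons_self, hx1⟩)
      have hx2S : x2 ∈ PySem.Set.ofList list :=
        hperm.mem_iff.mp (List.mem_flatten.mpr
          ⟨l2, List.mem_cons_of_mem _ List.mem_cons_self, hx2⟩)
      have hr : Reach (PySem.Set.ofList list) x1 x2 :=
        (Reach_symm (hgood x1 hx1S)).trans (hgood x2 hx2S)
      have hx2l1 : x2 ∈ l1 :=
        comp_closed _ _ ⟨hperm, hne, hreach, hclosed⟩ List.mem_cons_self hx1 hr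
      have hndf : (l1 :: l2 :: t).flatten.Nodup := (hperm.nodup_iff).mpr hnd
      have : (l1 ++ (l2 :: t).flatten).Nodup := by simpa using hndf
      exact (List.nodup_append.mp this).2.2 x2 hx2l1 x2
        (List.mem_flatten.mpr ⟨l2, List.mem_cons_self, hx2⟩) rfl

-- ===== VERDICT (by name: the statement is the Claim_ definition above) =====
theorem BFS_spec : Claim_equal_BFS := by
  intro list _
  unfold Spec_BFS
  rcases h6 : decide ((PySem.Set.ofList list).length ≤ 6) with _ | _
  · have h6' : ¬ (PySem.Set.ofList list).length ≤ 6 := by simpa using h6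
    obtain ⟨a, s', hS⟩ : ∃ a s', PySem.Set.ofList list = a :: s' := by
      cases hS : PySem.Set.ofList list with
      | nil => rw [hS] at h6'; simp at h6'
      | cons a s' => exact ⟨a, s', rfl⟩
    rw [Bool.eq_iff_iff, BFS_char list a s' hS h6', BFS_alt_char list a s' hS h6']
  · have h6' : (PySem.Set.ofList list).length ≤ 6 := by simpa using h6
    simp [BFS, BFS_alt, h6']
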